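-- pv_equiv track=rewrite | github.com/vauban-network/Idefix | Moulinette/Scripts/Sockets/Servers/server_socket_main.py | calculate_final_result
-- ===== SOURCE A (Python) =====
-- def calculate_final_result(responses):
--     has_one = False
--     all_zeros = True
--     all_404 = True
--     for response in responses:
--         if response[2] == "1":
--             has_one = True
--             all_zeros = False
--         elif response[2] == "0":
--             all_404 = False
--         elif response[2] == "404":
--             all_zeros = False
--     if has_one:
--         return "MALICIOUS"
--     elif all_404:
--         return "ERROR"
--     elif all_zeros:
--         return "SAFE"
--     else:
--         return "ERROR"
-- ===== SOURCE B (Python) =====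
-- def calculate_final_result(responses):
--     codes = [response[2] for response in responses]
--     if "1" in codes:
--         return "MALICIOUS"
--     elif "0" not in codes:
--         return "ERROR"
--     elif "404" in codes:
--         return "ERROR"
--     else:
--         return "SAFE"
-- ===== Notes on version B (the rewrite author's own statement) =====
-- stated objective: simpler
-- what changed: Replaces the three-flag accumulating loop with an extract-then-query decomposition: build the list of codes once, then decide the verdict by three membership tests.
import Mathlib
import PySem

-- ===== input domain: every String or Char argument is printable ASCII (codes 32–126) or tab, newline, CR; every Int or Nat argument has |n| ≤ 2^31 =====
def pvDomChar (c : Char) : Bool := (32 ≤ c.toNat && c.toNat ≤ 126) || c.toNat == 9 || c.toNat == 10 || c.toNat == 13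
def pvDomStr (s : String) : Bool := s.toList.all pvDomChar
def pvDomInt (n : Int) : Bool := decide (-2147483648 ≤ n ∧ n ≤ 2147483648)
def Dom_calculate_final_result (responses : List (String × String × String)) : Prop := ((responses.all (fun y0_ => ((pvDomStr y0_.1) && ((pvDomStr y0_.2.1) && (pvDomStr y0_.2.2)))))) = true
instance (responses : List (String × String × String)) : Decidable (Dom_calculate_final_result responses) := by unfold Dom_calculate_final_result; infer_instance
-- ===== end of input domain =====

-- B replaces A's three-flag accumulating loop by extract-then-query: map out the codes, then three membership tests (simpler decomposition, same O(n) cost).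

-- ===== PORT A =====
-- state = (has_one, all_zeros, all_404), updated exactly as A's loop body
def calculate_final_result (responses : List (String × String × String)) : String :=
  let st := responses.foldl
    (fun (s : Bool × Bool × Bool) response =>
      if response.2.2 == "1" then (true, false, s.2.2)
      else if response.2.2 == "0" then (s.1, s.2.1, false)
      else if response.2.2 == "404" then (s.1, false, s.2.2)
      else s)
    (false, true, true)
  if st.1 then "MALICIOUS"
  else if st.2.2 then "ERROR"
  else if st.2.1 then "SAFE"
  else "ERROR"

-- ===== PORT B =====
def calculate_final_result_alt (responses : List (String × String × String)) : String :=
  let codes := responses.map (fun response => response.2.2)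
  if codes.contains "1" then "MALICIOUS"
  else if ¬ codes.contains "0" then "ERROR"
  else if codes.contains "404" then "ERROR"
  else "SAFE"

-- ===== PRECONDITION & SPEC =====
def Spec_calculate_final_result (responses : List (String × String × String)) (out : String) : Prop := out = calculate_final_result_alt responses
instance (responses : List (String × String × String)) (out : String) : Decidable (Spec_calculate_final_result responses out) := by unfold Spec_calculate_final_result; infer_instance

-- ===== CLAIM (what is proved, stated in full; the proofs are below) =====
def Claim_equal_calculate_final_result : Prop := ∀ (responses : List (String × String × String)), Dom_calculate_final_result responses → Spec_calculate_final_result responses (calculate_final_result responses)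

-- ===== LEMMAS AND PROOFS =====

-- invariant of A's loop: the final flags in terms of membership in the list of codes
theorem pv_fold_inv (l : List (String × String × String)) (h az a4 : Bool) :
    l.foldl
      (fun (s : Bool × Bool × Bool) response =>
        if response.2.2 == "1" then (true, false, s.2.2)
        else if response.2.2 == "0" then (s.1, s.2.1, false)
        else if response.2.2 == "404" then (s.1, false, s.2.2)
        else s)
      (h, az, a4)
    = (h || (l.map (fun r => r.2.2)).contains "1",
       az && !(l.map (fun r => r.2.2)).contains "1" && !(l.map (fun r => r.2.2)).contains "404",
       a4 && !(l.map (fun r => r.2.2)).contains "0") := by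
  induction l generalizing h az a4 with
  | nil => simp
  | cons x xs ih =>
    simp only [beq_iff_eq] at ih ⊢
    simp only [List.foldl_cons, List.map_cons]
    split_ifs with h1 h0 h4
    · rw [ih]
      simp [List.contains_eq_mem, List.mem_cons, h1]
    · rw [ih]
      simp [List.contains_eq_mem, List.mem_cons, h0]
    · rw [ih]
      simp [List.contains_eq_mem, List.mem_cons, h4]
    · rw [ih]
      have h1' : ¬ ("1" = x.2.2) := fun e => h1 e.symm
      have h0' : ¬ ("0" = x.2.2) := fun e => h0 e.symm
      have h4' : ¬ ("404" = x.2.2) := fun e => h4 e.symm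
      have e1 : ("1" == x.2.2) = false := beq_eq_false_iff_ne.2 h1'
      have e0 : ("0" == x.2.2) = false := beq_eq_false_iff_ne.2 h0'
      have e4 : ("404" == x.2.2) = false := beq_eq_false_iff_ne.2 h4'
      simp [List.contains_eq_mem, List.mem_cons, h1', h0', h4', e1, e0, e4]

-- ===== VERDICT (by name: the statement is the Claim_ definition above) =====
theorem calculate_final_result_spec : Claim_equal_calculate_final_result := by
  intro responses _
  unfold Spec_calculate_final_result calculate_final_result calculate_final_result_alt
  rw [pv_fold_inv]
  cases hc1 : (responses.map (fun r => r.2.2)).contains "1" <;>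
  cases hc0 : (responses.map (fun r => r.2.2)).contains "0" <;>
  cases hc4 : (responses.map (fun r => r.2.2)).contains "404" <;>
  simp only [hc1, hc0, hc4] <;> simp
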